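-- pv_equiv track=rewrite | github.com/XiaoqianZhu1997/cs61a | exam/exam_prep04.py | decrypt
-- ===== SOURCE A (Python) =====
-- def decrypt(s, d):   # s: string & d: dictionary
--     """List all possible decoded strings of s.
--     >>> codes = {
--     ...     'alan': 'spooky',
--     ...     'al': 'drink',
--     ...     'antu': 'your',
--     ...     'turing': 'ghosts',
--     ...     'tur': 'scary',
--     ...     'ing': 'skeletons',
--     ...     'ring': 'ovaltine'
--     ... }
--     >>> decrypt('alanturing', codes)
--     ['drink your ovaltine', 'spooky ghosts', 'spooky scary
--         skeletons']
--     """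
--     if s == '':
--         return []
--     ms = []
--     if s in d:   # 如果dictionary中直接有与s一致的key
--         ms.append(d[s])
--     for k in range(len(s)):  # 将string进行拆分
--         first, suffix = s[:k], s[k:]
--         if first in d:
--             for rest in decrypt(suffix, d):
--                 ms.append(d[first] + ' ' + rest)
--     return ms
-- ===== SOURCE B (Python) =====
-- def decrypt(s, d):   # s: string & d: dictionary
--     """Bottom-up DP over suffixes: memo[m] holds all decodings of the last m
--     characters of s, each suffix decoded once; code words are probed only up
--     to the longest key length."""
--     n = len(s)
--     maxlen = max(map(len, d), default=0)
--     memo = [[]]                      # memo[0]: decodings of the empty suffix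
--     for m in range(1, n + 1):
--         i = n - m
--         res = []
--         if m <= maxlen and s[i:] in d:   # the whole suffix is one code word
--             res.append(d[s[i:]])
--         for t in range(1, min(m - 1, maxlen) + 1):   # split off a code-word prefix
--             first = s[i:i + t]
--             if first in d:
--                 res.extend(d[first] + ' ' + rest for rest in memo[m - t])
--         memo.append(res)
--     return memo[n]
-- ===== Notes on version B (the rewrite author's own statement) =====
-- stated objective: faster
-- what changed: A enumerates decodings by naive exponential recursion over suffixes; B fills a bottom-up memo table whose entry m holds the decodings of the last m characters (each suffix decoded once), probing code words only up to the longest key length.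
import Mathlib
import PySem

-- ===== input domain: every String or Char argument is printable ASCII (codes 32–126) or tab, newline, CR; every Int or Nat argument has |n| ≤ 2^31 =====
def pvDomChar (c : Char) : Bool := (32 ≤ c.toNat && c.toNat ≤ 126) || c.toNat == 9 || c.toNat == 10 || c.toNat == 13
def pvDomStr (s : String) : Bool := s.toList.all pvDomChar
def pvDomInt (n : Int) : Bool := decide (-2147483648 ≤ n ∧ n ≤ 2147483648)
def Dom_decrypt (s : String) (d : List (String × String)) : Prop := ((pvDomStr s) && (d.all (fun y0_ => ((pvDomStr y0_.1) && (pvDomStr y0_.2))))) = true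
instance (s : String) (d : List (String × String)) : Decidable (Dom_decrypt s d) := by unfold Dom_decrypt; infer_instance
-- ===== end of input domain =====

-- B replaces A's exponential recursion over suffixes by a bottom-up table of
-- suffix decodings (objective: faster). Equivalence is claimed under Pre_,
-- which only excludes inputs where A hits RecursionError.

-- Python dict membership/lookup on the association list (first match), used by both ports.
def dget (d : List (String × String)) (k : String) : Option String :=
  (d.find? (fun p => p.1 == k)).map (·.2)

-- ===== PORT A =====
-- Fuel only makes Python's recursion total in Lean; on every Pre_ input the
-- initial fuel is never exhausted (A's recursion depth is bounded by |s| there).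
def decryptF (d : List (String × String)) : Nat → List Char → List String
  | 0, _ => []
  | fuel+1, s =>
    if s = [] then []
    else
      let ms : List String := []
      let ms := match dget d (String.ofList s) with
        | some v => ms ++ [v]
        | none => ms
      (List.range s.length).foldl (fun ms k =>
        match dget d (String.ofList (s.take k)) with
        | some v => (decryptF d fuel (s.drop k)).foldl
                      (fun ms rest => ms ++ [v ++ " " ++ rest]) ms
        | none => ms) ms

def decrypt (s : String) (d : List (String × String)) : List String :=
  decryptF d (s.toList.length + 1) s.toList

-- ===== PORT B =====
-- one row of the table: all decodings of the suffix `suf` (of length m), given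
-- memo = rows for all strictly shorter suffixes; code-word probes stop at maxlen
def rowB (d : List (String × String)) (suf : List Char)
    (memo : List (List String)) (m maxlen : Nat) : List String :=
  let res : List String :=
    if m ≤ maxlen then
      match dget d (String.ofList suf) with
      | some v => [v]
      | none => []
    else []
  (List.range' 1 (min (m - 1) maxlen)).foldl (fun res t =>
    match dget d (String.ofList (suf.take t)) with
    | some v => res ++ (memo.getD (m - t) []).map (fun rest => v ++ " " ++ rest)
    | none => res) res

def decrypt_alt (s : String) (d : List (String × String)) : List String :=
  let cs := s.toList
  let n := cs.length
  let maxlen := d.foldl (fun acc p => max acc p.1.length) 0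
  let memo := (List.range' 1 n).foldl
    (fun memo m => memo ++ [rowB d (cs.drop (n - m)) memo m maxlen]) [[]]
  memo.getD n []

-- ===== PRECONDITION & SPEC =====
-- Pre_ excludes exactly the inputs where A never returns: a non-empty s with the
-- empty string as a dictionary key makes A recurse on s forever (RecursionError).
def Pre_decrypt (s : String) (d : List (String × String)) : Prop :=
  s = "" ∨ ∀ p ∈ d, p.1 ≠ ""
instance (s : String) (d : List (String × String)) : Decidable (Pre_decrypt s d) := by
  unfold Pre_decrypt; infer_instance

def pvWitness_decrypt : String × (List (String × String)) :=
  ("ab", [("a", "x"), ("b", "y"), ("ab", "z")])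

def Spec_decrypt (s : String) (d : List (String × String)) (out : List String) : Prop := out = decrypt_alt s d
instance (s : String) (d : List (String × String)) (out : List String) : Decidable (Spec_decrypt s d out) := by unfold Spec_decrypt; infer_instance

-- ===== CLAIM (what is proved, stated in full; the proofs are below) =====
def Claim_equal_decrypt : Prop := ∀ (s : String) (d : List (String × String)), Dom_decrypt s d → Pre_decrypt s d → Spec_decrypt s d (decrypt s d)

-- ===== LEMMAS AND PROOFS =====

-- shorthand used only by the proofs: A's value at its canonical fuel
def Fd (d : List (String × String)) (u : List Char) : List String :=
  decryptF d (u.length + 1) u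

theorem dget_empty (d : List (String × String)) (hd : ∀ p ∈ d, p.1 ≠ "") :
    dget d "" = none := by
  simp only [dget, Option.map_eq_none_iff, List.find?_eq_none]
  intro p hp
  simpa using hd p hp

-- A's value does not depend on the fuel once the fuel exceeds the length
theorem fuel_irrel (d : List (String × String)) (hd : ∀ p ∈ d, p.1 ≠ "") :
    ∀ (n : Nat) (u : List Char) (f1 f2 : Nat), u.length = n →
    n < f1 → n < f2 → decryptF d f1 u = decryptF d f2 u := by
  intro n
  induction n using Nat.strong_induction_on with
  | _ n IH =>
    intro u f1 f2 hu h1 h2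
    obtain ⟨a, rfl⟩ : ∃ a, f1 = a + 1 := ⟨f1 - 1, by omega⟩
    obtain ⟨b, rfl⟩ : ∃ b, f2 = b + 1 := ⟨f2 - 1, by omega⟩
    simp only [decryptF]
    by_cases hne : u = []
    · simp [hne]
    · simp only [if_neg hne]
      apply PySem.List.foldl_congr_mem
      intro acc k hk
      rw [List.mem_range] at hk
      match k with
      | 0 => simp [dget_empty d hd]
      | t+1 =>
        have hrec : decryptF d a (u.drop (t+1)) = decryptF d b (u.drop (t+1)) := by
          apply IH (u.length - (t+1)) (by omega) _ _ _ (by simp) (by omega) (by omega)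
        rw [hrec]

theorem Fd_eq (d : List (String × String)) (hd : ∀ p ∈ d, p.1 ≠ "")
    (u : List Char) (hne : u ≠ []) :
    Fd d u = (List.range' 1 (u.length - 1)).foldl
      (fun res t => match dget d (String.ofList (u.take t)) with
        | some v => res ++ (Fd d (u.drop t)).map (fun rest => v ++ " " ++ rest)
        | none => res)
      (match dget d (String.ofList u) with | some v => [v] | none => []) := by
  obtain ⟨m, hm⟩ : ∃ m, u.length = m + 1 :=
    ⟨u.length - 1, by cases u <;> simp_all⟩
  unfold Fd
  conv_lhs => rw [decryptF]
  simp only [if_neg hne, List.nil_append]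
  rw [List.range_eq_range', hm, List.range'_succ]
  simp only [List.foldl_cons, List.take_zero]
  rw [dget_empty d hd]
  simp only [Nat.add_sub_cancel]
  apply PySem.List.foldl_congr_mem
  intro acc t ht
  rw [List.mem_range'_1] at ht
  rcases hdg : dget d (String.ofList (u.take t)) with _ | v
  · rfl
  · simp only
    rw [PySem.List.foldl_append_singleton_eq_map]
    have hrec : decryptF d (m + 1) (u.drop t) = decryptF d ((u.drop t).length + 1) (u.drop t) :=
      fuel_irrel d hd ((u.drop t).length) _ _ _ rfl (by simp; omega) (by omega)
    rw [hrec]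

-- a lookup of a string longer than every key misses
theorem dget_long (d : List (String × String)) (maxlen : Nat)
    (hmax : ∀ p ∈ d, p.1.length ≤ maxlen) (w : String) (hw : maxlen < w.length) :
    dget d w = none := by
  simp only [dget, Option.map_eq_none_iff, List.find?_eq_none]
  intro p hp
  simp only [beq_iff_eq]
  intro h
  have := hmax p hp
  rw [h] at this
  omega

-- A's fold over all split points collapses to B's fold bounded by maxlen
theorem fold_trunc (d : List (String × String)) (maxlen : Nat)
    (hmax : ∀ p ∈ d, p.1.length ≤ maxlen) (u : List Char) (m : Nat)
    (hm : u.length = m + 1) (F : Nat → String → List String)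
    (init : List String) :
    (List.range' 1 m).foldl
      (fun res t => match dget d (String.ofList (u.take t)) with
        | some v => res ++ F t v
        | none => res) init
    = (List.range' 1 (min m maxlen)).foldl
      (fun res t => match dget d (String.ofList (u.take t)) with
        | some v => res ++ F t v
        | none => res) init := by
  set K := min m maxlen with hK
  have hsum : K + (m - K) = m := by omega
  have hsplit := List.range'_append (s := 1) (m := K) (n := m - K) (step := 1)
  rw [one_mul, hsum] at hsplit
  rw [← hsplit, List.foldl_append]
  rw [PySem.List.foldl_congr_mem _ _ (fun acc _ => acc) _ ?_, PySem.List.foldl_ignore]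
  intro acc t ht
  rw [List.mem_range'_1] at ht
  have hnone : dget d (String.ofList (u.take t)) = none := by
    apply dget_long d maxlen hmax
    have htu : t ≤ u.length := by omega
    simp [List.length_take, htu]
    omega
  rw [hnone]

theorem build_inv (d : List (String × String)) (hd : ∀ p ∈ d, p.1 ≠ "")
    (maxlen : Nat) (hmax : ∀ p ∈ d, p.1.length ≤ maxlen)
    (cs : List Char) : ∀ m, m ≤ cs.length →
    (List.range' 1 m).foldl
      (fun memo mm => memo ++ [rowB d (cs.drop (cs.length - mm)) memo mm maxlen]) [[]]
    = (List.range (m+1)).map (fun t => Fd d (cs.drop (cs.length - t))) := by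
  intro m
  induction m with
  | zero =>
    intro _
    simp [List.range_succ, Fd, decryptF]
  | succ m IH =>
    intro hm
    rw [List.range'_concat, List.foldl_append, IH (by omega)]
    simp only [List.foldl_cons, List.foldl_nil]
    have h1m : 1 + 1 * m = m + 1 := by omega
    rw [h1m]
    conv_rhs => rw [List.range_succ]
    rw [List.map_append]
    congr 1
    -- the new row equals A's value on the suffix of length m+1
    set u : List Char := cs.drop (cs.length - (m+1)) with hu
    have hul : u.length = m + 1 := by simp [hu]; omega
    have hune : u ≠ [] := by
      intro h; rw [h] at hul; simp at hul
    simp only [List.map_cons, List.map_nil]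
    congr 1
    rw [Fd_eq d hd u hune, rowB, hul]
    simp only [Nat.add_sub_cancel]
    rw [fold_trunc d maxlen hmax u m hul
      (F := fun t v => (Fd d (u.drop t)).map (fun rest => v ++ " " ++ rest))]
    by_cases hml : m + 1 ≤ maxlen
    · rw [if_pos hml]
      apply PySem.List.foldl_congr_mem
      intro acc t ht
      rw [List.mem_range'_1] at ht
      rcases hdg : dget d (String.ofList (u.take t)) with _ | v
      · rfl
      · simp only
        have hidx : m + 1 - t < m + 1 := by omega
        rw [PySem.List.getD_map_range _ _ _ _ hidx]
        have hdrop : cs.drop (cs.length - (m + 1 - t)) = u.drop t := by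
          rw [hu, List.drop_drop]
          congr 1
          omega
        rw [hdrop]
    · rw [if_neg hml,
        dget_long d maxlen hmax (String.ofList u) (by simp [hul]; omega)]
      apply PySem.List.foldl_congr_mem
      intro acc t ht
      rw [List.mem_range'_1] at ht
      rcases hdg : dget d (String.ofList (u.take t)) with _ | v
      · rfl
      · simp only
        have hidx : m + 1 - t < m + 1 := by omega
        rw [PySem.List.getD_map_range _ _ _ _ hidx]
        have hdrop : cs.drop (cs.length - (m + 1 - t)) = u.drop t := by
          rw [hu, List.drop_drop]
          congr 1
          omega
        rw [hdrop]

-- ===== VERDICT (by name: the statement is the Claim_ definition above) =====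
theorem decrypt_spec : Claim_equal_decrypt := by
  intro s d _ hpre
  unfold Spec_decrypt decrypt decrypt_alt
  rcases hpre with rfl | hd
  · simp [decryptF]
  · simp only []
    rw [build_inv d hd (d.foldl (fun acc p => max acc p.1.length) 0)
      (PySem.List.le_foldl_max_nat d (fun p => p.1.length) 0).2
      s.toList s.toList.length (le_refl _)]
    rw [PySem.List.getD_map_range _ _ _ _ (by omega)]
    simp [Fd]
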